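-- pv_equiv track=rewrite | github.com/Moyaccercchi/bio-info-graph | python/5_read_aligner/e11.py | find_rows_with_letter
-- ===== SOURCE A (Python) =====
-- def find_rows_with_letter(letter, BWT, startAt, endAt):
--
--     startRow = -1;
--     endRow = -1;
--
--     for i in range(startAt, endAt+1):
--         if BWT[i] == letter:
--             startRow = i
--             break
--
--     for i in range(endAt, startAt-1, -1):
--         if BWT[i] == letter:
--             endRow = i
--             break
--
--     return [startRow, endRow]
-- ===== SOURCE B (Python) =====
-- def find_rows_with_letter(letter, BWT, startAt, endAt):
--     # Single forward pass: record the first and last matching index together.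
--     startRow = -1
--     endRow = -1
--     found = False
--     for i in range(startAt, endAt + 1):
--         if BWT[i] == letter:
--             if not found:
--                 startRow = i
--                 found = True
--             endRow = i
--     return [startRow, endRow]
-- ===== Notes on version B (the rewrite author's own statement) =====
-- stated objective: simpler
-- what changed: Replaces A's two opposite-direction break-scans with one forward pass that accumulates both the first and the last matching index.
import Mathlib
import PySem

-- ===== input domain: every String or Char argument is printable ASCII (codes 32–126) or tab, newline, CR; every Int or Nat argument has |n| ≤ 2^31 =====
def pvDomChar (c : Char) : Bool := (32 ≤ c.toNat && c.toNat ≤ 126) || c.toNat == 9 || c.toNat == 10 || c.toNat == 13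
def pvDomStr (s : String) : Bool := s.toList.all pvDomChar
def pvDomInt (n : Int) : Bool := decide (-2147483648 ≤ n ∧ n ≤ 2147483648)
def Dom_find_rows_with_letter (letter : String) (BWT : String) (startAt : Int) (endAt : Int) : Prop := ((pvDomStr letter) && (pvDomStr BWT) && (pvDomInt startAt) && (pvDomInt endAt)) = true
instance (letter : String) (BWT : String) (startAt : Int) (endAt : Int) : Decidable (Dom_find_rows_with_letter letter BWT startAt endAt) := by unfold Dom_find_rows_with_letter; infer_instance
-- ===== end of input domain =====

-- B replaces A's two opposite-direction break-scans with one forward pass accumulating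
-- both the first and the last matching index (objective: simpler).

-- 'BWT[i] == letter' (Python compares the 1-char string at i with letter).
-- When pyGet? = none Python raises IndexError (excluded by Pre_); the port continues as no-match there.
def pvMatchAt (letter : String) (BWT : String) (i : Int) : Bool :=
  match PySem.Str.pyGet? BWT i with
  | some c => String.ofList [c] == letter
  | none => false

-- ===== PORT A =====
-- 'for i in range(...): if BWT[i] == letter: <row> = i; break' — scan, return first match or -1.
def pvScanBreak (letter : String) (BWT : String) : List Int → Int
  | [] => -1
  | i :: rest => if pvMatchAt letter BWT i then i else pvScanBreak letter BWT rest

def find_rows_with_letter (letter : String) (BWT : String) (startAt : Int) (endAt : Int) : List Int :=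
  let startRow := pvScanBreak letter BWT (PySem.List.pyRange startAt (endAt + 1) 1)
  let endRow := pvScanBreak letter BWT (PySem.List.pyRange endAt (startAt - 1) (-1))
  [startRow, endRow]

-- ===== PORT B =====
-- state (startRow, endRow, found); one forward pass over range(startAt, endAt+1)
def find_rows_with_letter_alt (letter : String) (BWT : String) (startAt : Int) (endAt : Int) : List Int :=
  let st := (PySem.List.pyRange startAt (endAt + 1) 1).foldl
    (fun (acc : Int × Int × Bool) i =>
      if pvMatchAt letter BWT i then
        (if acc.2.2 then acc.1 else i, i, true)
      else acc)
    (-1, -1, false)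
  [st.1, st.2.1]

-- ===== PRECONDITION & SPEC =====
-- Exactly the inputs on which Python A returns: either the scanned range is empty, or both
-- loops only index within Python bounds (the first index each loop touches is startAt resp.
-- endAt, so A raises IndexError precisely when this fails).
def Pre_find_rows_with_letter (letter : String) (BWT : String) (startAt : Int) (endAt : Int) : Prop :=
  endAt < startAt ∨ (-(BWT.length : Int) ≤ startAt ∧ endAt < (BWT.length : Int))
instance (letter : String) (BWT : String) (startAt : Int) (endAt : Int) : Decidable (Pre_find_rows_with_letter letter BWT startAt endAt) := by unfold Pre_find_rows_with_letter; infer_instance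

def pvWitness_find_rows_with_letter : String × String × Int × Int := ("a", "abba", 0, 3)

def Spec_find_rows_with_letter (letter : String) (BWT : String) (startAt : Int) (endAt : Int) (out : List Int) : Prop := out = find_rows_with_letter_alt letter BWT startAt endAt
instance (letter : String) (BWT : String) (startAt : Int) (endAt : Int) (out : List Int) : Decidable (Spec_find_rows_with_letter letter BWT startAt endAt out) := by unfold Spec_find_rows_with_letter; infer_instance

-- ===== CLAIM (what is proved, stated in full; the proofs are below) =====
def Claim_equal_find_rows_with_letter : Prop := ∀ (letter : String) (BWT : String) (startAt : Int) (endAt : Int), Dom_find_rows_with_letter letter BWT startAt endAt → Pre_find_rows_with_letter letter BWT startAt endAt → Spec_find_rows_with_letter letter BWT startAt endAt (find_rows_with_letter letter BWT startAt endAt)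

-- ===== LEMMAS AND PROOFS =====

theorem pvScanBreak_eq_find? (letter BWT : String) (l : List Int) :
    pvScanBreak letter BWT l = (l.find? (pvMatchAt letter BWT)).getD (-1) := by
  induction l with
  | nil => rfl
  | cons i rest ih =>
    by_cases h : pvMatchAt letter BWT i = true
    · simp [pvScanBreak, List.find?, h]
    · simp [pvScanBreak, List.find?, h, ih]

theorem pvFold_found (letter BWT : String) (l : List Int) :
    ∀ (s e : Int),
      l.foldl (fun (acc : Int × Int × Bool) i =>
          if pvMatchAt letter BWT i then (if acc.2.2 then acc.1 else i, i, true) else acc)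
        (s, e, true)
      = (s, (l.reverse.find? (pvMatchAt letter BWT)).getD e, true) := by
  induction l with
  | nil => intro s e; rfl
  | cons i rest ih =>
    intro s e
    by_cases h : pvMatchAt letter BWT i = true
    · simp only [List.foldl_cons, h, if_true, ih]
      rw [List.reverse_cons, List.find?_append]
      cases hr : rest.reverse.find? (pvMatchAt letter BWT) with
      | none => simp [List.find?, h]
      | some v => simp
    · rw [List.foldl_cons, if_neg h, ih]
      rw [List.reverse_cons, List.find?_append]
      cases hr : rest.reverse.find? (pvMatchAt letter BWT) <;> simp [List.find?, h, hr]

theorem pvFold_spec (letter BWT : String) (l : List Int) :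
    l.foldl (fun (acc : Int × Int × Bool) i =>
        if pvMatchAt letter BWT i then (if acc.2.2 then acc.1 else i, i, true) else acc)
      (-1, -1, false)
    = ((l.find? (pvMatchAt letter BWT)).getD (-1),
       (l.reverse.find? (pvMatchAt letter BWT)).getD (-1),
       l.any (pvMatchAt letter BWT)) := by
  induction l with
  | nil => rfl
  | cons i rest ih =>
    by_cases h : pvMatchAt letter BWT i = true
    · simp only [List.foldl_cons, h, if_true, if_neg (by simp : ¬ (((-1 : Int), (-1 : Int), false).2.2 = true))]
      rw [pvFold_found]
      rw [List.reverse_cons, List.find?_append]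
      cases hr : rest.reverse.find? (pvMatchAt letter BWT) with
      | none => simp [List.find?, List.any_cons, h]
      | some v => simp [List.find?, List.any_cons, h]
    · rw [List.foldl_cons, if_neg h, ih]
      rw [List.reverse_cons, List.find?_append]
      cases hr : rest.reverse.find? (pvMatchAt letter BWT) <;>
        simp [List.find?, List.any_cons, h, hr]

-- the backward range of A is the reverse of the forward range
theorem pvRange_back (startAt endAt : Int) :
    PySem.List.pyRange endAt (startAt - 1) (-1)
      = (PySem.List.pyRange startAt (endAt + 1) 1).reverse := by
  have h := PySem.List.pyRange_neg_one_eq_reverse endAt (startAt - 1)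
  rw [h]
  norm_num

-- ===== VERDICT (by name: the statement is the Claim_ definition above) =====
theorem find_rows_with_letter_spec : Claim_equal_find_rows_with_letter := by
  intro letter BWT startAt endAt _ _
  unfold Spec_find_rows_with_letter find_rows_with_letter find_rows_with_letter_alt
  rw [pvRange_back, pvFold_spec, pvScanBreak_eq_find?, pvScanBreak_eq_find?]
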